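-- pv_equiv track=rewrite | github.com/KarolinaPSouza/dataset-pesquisa | 1197-Cycle_Finding/9636388.py | find_cycle
-- ===== SOURCE A (Python) =====
-- def find_cycle(predecessor, start):
--     cycle = []
--     visited = set()
--     while start not in visited:
--         visited.add(start)
--         start = predecessor[start]
--
--     cycle_start = start
--     cycle.append(cycle_start)
--     current = predecessor[cycle_start]
--     while current != cycle_start:
--         cycle.append(current)
--         current = predecessor[current]
--     cycle.append(cycle_start)
--
--     cycle.reverse()
--     return cycle
-- ===== SOURCE B (Python) =====
-- def find_cycle(predecessor, start):
--     # One pass: record the walk and each node's position; when a node repeats,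
--     # the answer is read off the recorded path by slicing -- no second traversal.
--     pos = {}
--     path = []
--     while start not in pos:
--         pos[start] = len(path)
--         path.append(start)
--         start = predecessor[start]
--     i = pos[start]
--     return [start] + path[i + 1:][::-1] + [start]
-- ===== Notes on version B (the rewrite author's own statement) =====
-- stated objective: alternative
-- what changed: A walks with a visited set and then traverses the predecessor links a second time to collect the cycle; B makes a single recorded walk (path list + position dict) and reads the whole answer off the recorded path by slicing and reversing, with no second traversal of the links.
-- outside the precondition, e.g. on find_cycle({0: 0, 1: 5}, 0): A returns [0, 0], B returns [0, 0]
import Mathlib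
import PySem

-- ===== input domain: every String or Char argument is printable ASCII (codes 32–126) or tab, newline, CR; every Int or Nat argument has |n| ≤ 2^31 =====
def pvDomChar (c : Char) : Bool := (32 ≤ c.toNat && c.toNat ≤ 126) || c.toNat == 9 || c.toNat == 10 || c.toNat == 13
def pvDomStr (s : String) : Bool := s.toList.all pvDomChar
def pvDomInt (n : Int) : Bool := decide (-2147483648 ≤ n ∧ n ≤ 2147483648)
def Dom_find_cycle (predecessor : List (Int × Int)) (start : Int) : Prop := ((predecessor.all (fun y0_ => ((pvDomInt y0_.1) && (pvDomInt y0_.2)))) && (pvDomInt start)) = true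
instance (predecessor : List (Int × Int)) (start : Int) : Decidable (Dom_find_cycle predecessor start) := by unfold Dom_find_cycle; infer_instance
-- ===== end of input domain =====

-- B replaces A's two traversals (visited-set walk, then a second predecessor walk to
-- collect the cycle) by ONE recorded walk plus list slicing/reversal; equal output proved.

-- ===== PORT A =====
-- phase 1 of A: 'while start not in visited: visited.add(start); start = predecessor[start]'
-- fuel makes the loop total: |keys|+2 steps always suffice under Pre_; none = fuel out or KeyError
def findCycleWalkA (pred : List (Int × Int)) : Nat → PySem.Set Int → Int → Option Int
  | 0, _, _ => none
  | f+1, visited, s =>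
    if PySem.Set.contains visited s then some s
    else
      match (PySem.Dict.mk pred).get? s with
      | none => none                 -- KeyError: excluded by Pre_
      | some t => findCycleWalkA pred f (PySem.Set.add visited s) t

-- phase 2 of A: 'current = predecessor[cycle_start]; while current != cycle_start: cycle.append(current); …'
def findCycleCollectA (pred : List (Int × Int)) : Nat → Int → Int → List Int → Option (List Int)
  | 0, _, _, _ => none
  | f+1, cs, current, cycle =>
    if current = cs then some cycle
    else
      match (PySem.Dict.mk pred).get? current with
      | none => none                 -- KeyError: excluded by Pre_
      | some t => findCycleCollectA pred f cs t (cycle ++ [current])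

def find_cycle (predecessor : List (Int × Int)) (start : Int) : List Int :=
  match findCycleWalkA predecessor (predecessor.length + 2) PySem.Set.empty start with
  | none => []                       -- unreachable under Pre_
  | some cs =>
    match (PySem.Dict.mk predecessor).get? cs with
    | none => []                     -- KeyError: excluded by Pre_
    | some c =>
      match findCycleCollectA predecessor (predecessor.length + 2) cs c ([] ++ [cs]) with
      | none => []                   -- unreachable under Pre_
      | some cycle => (cycle ++ [cs]).reverse

-- ===== PORT B =====
-- B's single loop: 'while start not in pos: pos[start] = len(path); path.append(start); start = predecessor[start]'
def findCycleWalkB (pred : List (Int × Int)) :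
    Nat → PySem.Dict Int Int → List Int → Int → Option (PySem.Dict Int Int × List Int × Int)
  | 0, _, _, _ => none
  | f+1, pos, path, s =>
    if PySem.Dict.contains pos s then some (pos, path, s)
    else
      match (PySem.Dict.mk pred).get? s with
      | none => none                 -- KeyError: excluded by Pre_
      | some t => findCycleWalkB pred f (pos.insert s (path.length : Int)) (path ++ [s]) t

def find_cycle_alt (predecessor : List (Int × Int)) (start : Int) : List Int :=
  match findCycleWalkB predecessor (predecessor.length + 2) PySem.Dict.empty [] start with
  | none => []                       -- unreachable under Pre_
  | some (pos, path, s) =>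
    match pos.get? s with
    | none => []                     -- unreachable: s is a key of pos at loop exit
    | some i => [s] ++ (PySem.List.slice path (some (i + 1)) none).reverse ++ [s]
                                     -- path[i+1:][::-1] ; [::-1] is List.reverse (exact)

-- ===== PRECONDITION & SPEC =====
-- Pre_: start is a key and every stored value is again a key, the closed-form guarantee that no
-- predecessor[·] lookup raises KeyError. This is narrower than A's exact returning domain: A also
-- happens to return on some dicts with dangling values that its particular walk never touches
-- (see claim.json cites); those accidental cases are excluded to keep Pre_ a checkable shape.
def Pre_find_cycle (predecessor : List (Int × Int)) (start : Int) : Prop :=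
  ((PySem.Dict.mk predecessor).get? start).isSome = true ∧
  ∀ p ∈ predecessor, ((PySem.Dict.mk predecessor).get? p.2).isSome = true

instance (predecessor : List (Int × Int)) (start : Int) : Decidable (Pre_find_cycle predecessor start) := by
  unfold Pre_find_cycle; infer_instance

def pvWitness_find_cycle : (List (Int × Int)) × Int := ([(0, 1), (1, 2), (2, 1)], 0)

def Spec_find_cycle (predecessor : List (Int × Int)) (start : Int) (out : List Int) : Prop := out = find_cycle_alt predecessor start
instance (predecessor : List (Int × Int)) (start : Int) (out : List Int) : Decidable (Spec_find_cycle predecessor start out) := by unfold Spec_find_cycle; infer_instance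

-- ===== CLAIM (what is proved, stated in full; the proofs are below) =====
def Claim_equal_find_cycle : Prop := ∀ (predecessor : List (Int × Int)) (start : Int), Dom_find_cycle predecessor start → Pre_find_cycle predecessor start → Spec_find_cycle predecessor start (find_cycle predecessor start)

-- ===== LEMMAS AND PROOFS =====

-- l is a chain under pred: each element maps to the next
def PredChain (pred : List (Int × Int)) (l : List Int) : Prop :=
  ∀ j : Nat, (h : j + 1 < l.length) → (PySem.Dict.mk pred).get? l[j] = some l[j+1]

lemma predChain_suffix (pred : List (Int × Int)) (l₁ l₂ : List Int)
    (h : PredChain pred (l₁ ++ l₂)) : PredChain pred l₂ := by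
  intro j hj
  have hlen : l₁.length + j + 1 < (l₁ ++ l₂).length := by simp; omega
  have := h (l₁.length + j) (by simpa using hlen)
  simpa [List.getElem_append_right, Nat.add_assoc] using this

lemma predChain_snoc (pred : List (Int × Int)) (l : List Int) (s t : Int)
    (h : PredChain pred (l ++ [s])) (hs : (PySem.Dict.mk pred).get? s = some t) :
    PredChain pred ((l ++ [s]) ++ [t]) := by
  intro j hj
  simp only [List.length_append, List.length_singleton] at hj
  by_cases hlt : j + 1 < l.length + 1
  · have h0 := h j (by simp only [List.length_append, List.length_singleton]; omega)
    have e1 : ((l ++ [s]) ++ [t])[j]'(by simp only [List.length_append, List.length_singleton]; omega)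
        = (l ++ [s])[j]'(by simp only [List.length_append, List.length_singleton]; omega) :=
      List.getElem_append_left (by simp only [List.length_append, List.length_singleton]; omega)
    have e2 : ((l ++ [s]) ++ [t])[j+1]'(by simp only [List.length_append, List.length_singleton]; omega)
        = (l ++ [s])[j+1]'(by simp only [List.length_append, List.length_singleton]; omega) :=
      List.getElem_append_left (by simp only [List.length_append, List.length_singleton]; omega)
    rw [e1, e2]; exact h0
  · have hj' : j = l.length := by omega
    subst hj'
    have e1 : ((l ++ [s]) ++ [t])[l.length]'(by simp) = s := by
      rw [List.getElem_append_left (by simp)]; simp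
    have e2 : ((l ++ [s]) ++ [t])[l.length+1]'(by simp) = t := by
      rw [List.getElem_append_right (by simp)]; simp
    rw [e1, e2]; exact hs

lemma mem_of_get?_mk (pred : List (Int × Int)) (s t : Int)
    (h : (PySem.Dict.mk pred).get? s = some t) : (s, t) ∈ pred := by
  induction pred with
  | nil => simp [PySem.Dict.get?] at h
  | cons p rest ih =>
    rw [show (p :: rest : List (Int × Int)) = (p.1, p.2) :: rest by simp,
        PySem.Dict.get?_mk_cons] at h
    by_cases he : p.1 = s
    · simp [he] at h
      have : p = (s, t) := by apply Prod.ext <;> simp [he, h]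
      simp [← this]
    · simp [show (p.1 == s) = false by simpa using he] at h
      exact List.mem_cons.2 (Or.inr (ih h))

lemma nodup_keys_length_le (pred : List (Int × Int)) (l : List Int) (hn : l.Nodup)
    (hk : ∀ x ∈ l, ((PySem.Dict.mk pred).get? x).isSome = true) : l.length ≤ pred.length := by
  have hsub : l ⊆ pred.map Prod.fst := by
    intro x hx
    obtain ⟨t, ht⟩ := Option.isSome_iff_exists.1 (hk x hx)
    exact List.mem_map.2 ⟨(x, t), mem_of_get?_mk pred x t ht, rfl⟩
  calc l.length = l.toFinset.card := (List.toFinset_card_of_nodup hn).symm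
    _ ≤ (pred.map Prod.fst).toFinset.card :=
        Finset.card_le_card (fun x hx => List.mem_toFinset.2 (hsub (List.mem_toFinset.1 hx)))
    _ ≤ (pred.map Prod.fst).length := List.toFinset_card_le _
    _ = pred.length := by simp

-- the two phase-1 loops run in lockstep and B's recorded path is a nodup chain
lemma walk_sync (pred : List (Int × Int))
    (hclosed : ∀ p ∈ pred, ((PySem.Dict.mk pred).get? p.2).isSome = true) :
    ∀ (f : Nat) (pos : PySem.Dict Int Int) (path : List Int) (visited : PySem.Set Int) (s : Int),
    path.Nodup →
    (∀ x, PySem.Set.contains visited x = true ↔ x ∈ path) →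
    (∀ x, PySem.Dict.contains pos x = true ↔ x ∈ path) →
    (∀ j : Nat, (h : j < path.length) → pos.get? path[j] = some (j : Int)) →
    PredChain pred (path ++ [s]) →
    (∀ x ∈ path ++ [s], ((PySem.Dict.mk pred).get? x).isSome = true) →
    path.length + f = pred.length + 2 →
    ∃ (pos' : PySem.Dict Int Int) (path' : List Int) (cs : Int) (j : Nat),
      findCycleWalkA pred f visited s = some cs ∧
      findCycleWalkB pred f pos path s = some (pos', path', cs) ∧
      pos'.get? cs = some (j : Int) ∧
      j < path'.length ∧ path'[j]? = some cs ∧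
      path'.Nodup ∧ PredChain pred (path' ++ [cs]) ∧
      (∀ x ∈ path', ((PySem.Dict.mk pred).get? x).isSome = true) := by
  intro f
  induction f with
  | zero =>
    intro pos path visited s hnd hvis hpos hposj hchain hkeys hlen
    exfalso
    have hle : path.length ≤ pred.length :=
      nodup_keys_length_le pred path hnd (fun x hx => hkeys x (by simp [hx]))
    omega
  | succ f ih =>
    intro pos path visited s hnd hvis hpos hposj hchain hkeys hlen
    by_cases hmem : s ∈ path
    · obtain ⟨j, hj, hsj⟩ := List.getElem_of_mem hmem
      refine ⟨pos, path, s, j, ?_, ?_, ?_, hj, ?_, hnd, hchain, fun x hx => hkeys x (by simp [hx])⟩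
      · have hsv : s ∈ visited := (PySem.Set.contains_iff visited s).1 ((hvis s).2 hmem)
        simp [findCycleWalkA, hsv]
      · simp [findCycleWalkB, (hpos s).2 hmem]
      · rw [← hsj]; exact hposj j hj
      · rw [List.getElem?_eq_getElem hj, hsj]
    · have hA : PySem.Set.contains visited s = false := by
        rw [Bool.eq_false_iff]; intro hco; exact hmem ((hvis s).1 hco)
      have hB : PySem.Dict.contains pos s = false := by
        rw [Bool.eq_false_iff]; intro hco; exact hmem ((hpos s).1 hco)
      obtain ⟨t, ht⟩ := Option.isSome_iff_exists.1 (hkeys s (by simp))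
      have hkt : ((PySem.Dict.mk pred).get? t).isSome = true :=
        hclosed (s, t) (mem_of_get?_mk pred s t ht)
      have hres := ih (pos.insert s (path.length : Int)) (path ++ [s])
        (PySem.Set.add visited s) t
        (List.nodup_append.2 ⟨hnd, List.nodup_singleton s,
          by
            intro a ha b hb
            simp only [List.mem_singleton] at hb
            subst hb
            intro hcon
            exact hmem (hcon ▸ ha)⟩)
        (by
          intro x
          rw [PySem.Set.contains_iff, PySem.Set.mem_add, List.mem_append, List.mem_singleton]
          exact or_congr ((PySem.Set.contains_iff visited x).symm.trans (hvis x)) Iff.rfl)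
        (by
          intro x
          rw [PySem.Dict.contains_eq_isSome_get?]
          by_cases hxs : x = s
          · subst hxs; simp [PySem.Dict.get?_insert_self]
          · rw [PySem.Dict.get?_insert_of_ne _ _ hxs,
              ← PySem.Dict.contains_eq_isSome_get?, hpos x]
            simp [hxs])
        (by
          intro j hj
          simp only [List.length_append, List.length_singleton] at hj
          by_cases hjl : j < path.length
          · have hne : (path ++ [s])[j]'(by simp; omega) ≠ s := by
              rw [List.getElem_append_left hjl]
              intro hcon; exact hmem (hcon ▸ List.getElem_mem hjl)
            rw [PySem.Dict.get?_insert_of_ne _ _ hne,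
              List.getElem_append_left hjl]
            exact hposj j hjl
          · have hjeq : j = path.length := by omega
            subst hjeq
            have : (path ++ [s])[path.length]'(by simp) = s := by
              rw [List.getElem_append_right (by simp)]; simp
            rw [this, PySem.Dict.get?_insert_self])
        (predChain_snoc pred path s t hchain ht)
        (by
          intro x hx
          rcases List.mem_append.1 hx with hx | hx
          · exact hkeys x hx
          · simpa using (by simpa using hx : x = t) ▸ hkt)
        (by simp; omega)
      obtain ⟨pos', path', cs, j, hA', hB', hrest⟩ := hres
      refine ⟨pos', path', cs, j, ?_, ?_, hrest⟩
      · simp only [findCycleWalkA, hA, Bool.false_eq_true, if_false, ht]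
        exact hA'
      · simp only [findCycleWalkB, hB, Bool.false_eq_true, if_false, ht]
        exact hB'

-- A's phase-2 loop collects exactly the remaining chain
lemma collect_chain (pred : List (Int × Int)) (cs : Int) :
    ∀ (suf : List Int) (f : Nat) (acc : List Int) (c : Int),
    suf.length < f →
    (suf ++ [cs]).head? = some c →
    PredChain pred (suf ++ [cs]) →
    (∀ x ∈ suf, x ≠ cs) →
    findCycleCollectA pred f cs c acc = some (acc ++ suf) := by
  intro suf
  induction suf with
  | nil =>
    intro f acc c hf hc _ _
    simp at hc
    obtain ⟨f', rfl⟩ : ∃ f', f = f' + 1 := ⟨f - 1, by omega⟩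
    simp [findCycleCollectA, hc]
  | cons x rest ih =>
    intro f acc c hf hc hchain hne
    simp at hc
    subst hc
    obtain ⟨f', rfl⟩ : ∃ f', f = f' + 1 := ⟨f - 1, by omega⟩
    have hx : x ≠ cs := hne x (by simp)
    have hstep := hchain 0 (by simp)
    simp only [List.cons_append, List.getElem_cons_zero, List.getElem_cons_succ] at hstep
    have hd : (rest ++ [cs]).head? = some ((rest ++ [cs])[0]'(by simp)) := by
      rw [List.head?_eq_getElem?]; exact List.getElem?_eq_getElem _
    have hrec := ih f' (acc ++ [x]) ((rest ++ [cs])[0]'(by simp)) (by simp at hf ⊢; omega) hd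
      (predChain_suffix pred [x] _ (by simpa using hchain)) (fun y hy => hne y (by simp [hy]))
    simp only [findCycleCollectA, if_neg hx, hstep]
    simpa using hrec

lemma slice_from_succ (xs : List Int) (j : Nat) :
    PySem.List.slice xs (some ((j : Int) + 1)) none = xs.drop (j + 1) := by
  have := PySem.List.slice_from_natCast xs (j + 1)
  push_cast at this ⊢
  exact this

-- ===== VERDICT (by name: the statement is the Claim_ definition above) =====
theorem find_cycle_spec : Claim_equal_find_cycle := by
  intro pred start _hdom hpre
  unfold Spec_find_cycle
  obtain ⟨hstart, hclosed⟩ := hpre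
  obtain ⟨pos', path', cs, j, hA, hB, hget, hjlt, hjget, hnd, hchain, hkeys⟩ :=
    walk_sync pred hclosed (pred.length + 2) PySem.Dict.empty [] PySem.Set.empty start
      List.nodup_nil
      (fun x => by rw [show PySem.Set.contains PySem.Set.empty x = false from rfl]; simp)
      (fun x => by rw [show PySem.Dict.contains (PySem.Dict.empty (κ := Int) (ν := Int)) x = false from rfl]; simp)
      (fun j h => absurd h (by simp))
      (by intro j hj; simp at hj)
      (by intro x hx; simp at hx; subst hx; exact hstart)
      (by simp)
  obtain ⟨hjlt', hcs⟩ := List.getElem?_eq_some_iff.1 hjget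
  -- the value A looks up after phase 1
  have hc0 := hchain j (by simp only [List.length_append, List.length_singleton]; omega)
  have hjj : (path' ++ [cs])[j]'(by simp only [List.length_append, List.length_singleton]; omega) = cs := by
    rw [List.getElem_append_left hjlt']; exact hcs
  rw [hjj] at hc0
  -- the rest of the chain after position j
  set suf := path'.drop (j + 1) with hsuf
  have hsplit : (path' ++ [cs]).drop (j + 1) = suf ++ [cs] :=
    List.drop_append_of_le_length (by omega)
  have hc0' : (PySem.Dict.mk pred).get? cs =
      some ((suf ++ [cs])[0]'(by simp)) := by
    rw [hc0]
    congr 1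
    rw [show ((suf ++ [cs])[0]'(by simp)) = ((path' ++ [cs]).drop (j+1))[0]'(by rw [hsplit]; simp) from by
      congr 1 ; rw [hsplit]]
    rw [List.getElem_drop]
  have hhead : (suf ++ [cs]).head? = some ((suf ++ [cs])[0]'(by simp)) := by
    rw [List.head?_eq_getElem?]; exact List.getElem?_eq_getElem _
  have hchain' : PredChain pred (suf ++ [cs]) := by
    apply predChain_suffix pred ((path' ++ [cs]).take (j + 1))
    rw [← hsplit, List.take_append_drop]
    exact hchain
  have hnecs : ∀ x ∈ suf, x ≠ cs := by
    intro x hx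
    have hnd2 : ((path'.take (j+1)) ++ (path'.drop (j+1))).Nodup := by
      rw [List.take_append_drop]; exact hnd
    obtain ⟨-, -, hdisj⟩ := List.nodup_append.1 hnd2
    have hcstake : cs ∈ path'.take (j + 1) := by
      rw [← hcs]
      exact List.mem_take_iff_getElem.2 ⟨j, by omega, rfl⟩
    exact fun hcon => (hdisj cs hcstake x hx) (hcon ▸ rfl)
  have hlenle : path'.length ≤ pred.length := nodup_keys_length_le pred path' hnd hkeys
  have hfuel : suf.length < pred.length + 2 := by
    have : suf.length ≤ path'.length := by rw [hsuf]; simp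
    omega
  have hcollect := collect_chain pred cs suf (pred.length + 2) ([] ++ [cs])
    ((suf ++ [cs])[0]'(by simp)) hfuel hhead hchain' hnecs
  unfold find_cycle find_cycle_alt
  rw [hA, hB]
  simp only [hget, hc0', hcollect, slice_from_succ]
  simp [← hsuf]
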